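-- pv_equiv track=rewrite | github.com/adi271001/POTD | Gfg/Dominant-Pairs.py | dominantPairs
-- ===== SOURCE A (Python) =====
-- from typing import List
--
-- def dominantPairs(n : int, arr : List[int]) -> int:
--     # code here
--     i, j, ans = 0, n//2, 0
--     arr[:j] = sorted(arr[:j])
--     arr[j:] = sorted(arr[j:])
--     while i < n//2:
--         if j < n and arr[i] >= 5*arr[j]:
--             j += 1
--         else:
--             ans += j - (n//2)
--             i += 1
--     return ans
-- ===== SOURCE B (Python) =====
-- from typing import List
--
-- def dominantPairs(n : int, arr : List[int]) -> int:
--     # Same in-place sorting of both halves (same observable mutation as A), then for each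
--     # first-half element a per-element binary search over fives = [5*y for y in arr[n//2:n]]
--     # counts the second-half elements y with 5*y <= arr[i], instead of A's two-pointer sweep.
--     half = n // 2
--     arr[:half] = sorted(arr[:half])
--     arr[half:] = sorted(arr[half:])
--     fives = [5 * y for y in arr[half:n]]
--     ans = 0
--     for i in range(half):
--         x = arr[i]
--         lo, hi = 0, len(fives)
--         while lo < hi:
--             mid = (lo + hi) // 2
--             if fives[mid] <= x:
--                 lo = mid + 1
--             else:
--                 hi = mid
--         ans += lo
--     return ans
-- ===== Notes on version B (the rewrite author's own statement) =====
-- stated objective: alternative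
-- what changed: Replaces A's linear two-pointer sweep over the two sorted halves with a per-element binary search over fives = [5*y for y in arr[n//2:n]] (both sort the halves in place, preserving the mutation).
-- outside the precondition, e.g. on dominantPairs(3, [100, 10]): A raises IndexError, B returns 1; on dominantPairs(3, [0, 10]): A returns 0, B returns 0
import Mathlib
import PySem

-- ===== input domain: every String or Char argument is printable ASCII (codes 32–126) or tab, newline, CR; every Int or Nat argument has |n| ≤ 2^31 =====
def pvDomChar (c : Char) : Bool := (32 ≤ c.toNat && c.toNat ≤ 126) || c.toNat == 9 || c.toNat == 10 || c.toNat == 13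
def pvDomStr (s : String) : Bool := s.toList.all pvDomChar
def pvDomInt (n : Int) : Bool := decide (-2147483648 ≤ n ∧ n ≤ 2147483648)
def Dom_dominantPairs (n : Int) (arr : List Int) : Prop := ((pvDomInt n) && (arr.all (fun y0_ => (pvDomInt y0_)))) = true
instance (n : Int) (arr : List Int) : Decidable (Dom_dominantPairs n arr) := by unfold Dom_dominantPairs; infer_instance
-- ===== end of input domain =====

-- B replaces A's two-pointer sweep by a brute-force count of cross-half pairs; both sort the
-- two halves of arr in place (the same observable mutation); equivalence is about the return value.

-- ===== PORT A =====
-- shared mutation step: arr[:n//2] = sorted(arr[:n//2]); arr[n//2:] = sorted(arr[n//2:])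
-- (identical lines in both Python sources)
def pvMut (n : Int) (arr : List Int) : List Int :=
  (PySem.List.sorted (PySem.List.slice arr none (some (PySem.Int.floordiv n 2))) (fun x => x) false) ++
  (PySem.List.sorted (PySem.List.slice arr (some (PySem.Int.floordiv n 2)) none) (fun x => x) false)

-- the while loop of A; arr[i]/arr[j] are ported with default 0 (exact under Pre_, which
-- rules out the IndexError region n > len(arr)); the Nat fuel only makes the loop total:
-- each iteration shrinks (n - j).toNat + (n//2 - i).toNat, so the caller's fuel never runs out
def pvLoopA (n : Int) (a : List Int) : Nat → Int → Int → Int → Int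
  | 0, _, _, ans => ans
  | fuel + 1, i, j, ans =>
    if i < PySem.Int.floordiv n 2 then
      if j < n ∧ PySem.List.pyGetD a i 0 ≥ 5 * PySem.List.pyGetD a j 0 then
        pvLoopA n a fuel i (j + 1) ans
      else
        pvLoopA n a fuel (i + 1) j (ans + (j - PySem.Int.floordiv n 2))
    else ans

def dominantPairs (n : Int) (arr : List Int) : Int :=
  pvLoopA n (pvMut n arr)
    ((n - PySem.Int.floordiv n 2).toNat + (PySem.Int.floordiv n 2).toNat)
    0 (PySem.Int.floordiv n 2) 0

-- ===== PORT B =====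
-- the hand-written while loop of B's binary search (lo, hi bisection on fives);
-- the Nat fuel only makes the loop total: hi - lo shrinks every iteration, so any
-- fuel ≥ (hi - lo).toNat (the caller passes fives.length) never runs out
def pvBisect (fives : List Int) (x : Int) : Nat → Int → Int → Int
  | 0, lo, _ => lo
  | fuel + 1, lo, hi =>
    if lo < hi then
      let mid := PySem.Int.floordiv (lo + hi) 2
      if PySem.List.pyGetD fives mid 0 ≤ x then pvBisect fives x fuel (mid + 1) hi
      else pvBisect fives x fuel lo mid
    else lo

def dominantPairs_alt (n : Int) (arr : List Int) : Int :=
  let half := PySem.Int.floordiv n 2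
  let a := pvMut n arr
  let fives := (PySem.List.slice a (some half) (some n)).map (fun y => 5 * y)
  (PySem.List.pyRange 0 half 1).foldl
    (fun ans i => ans + pvBisect fives (PySem.List.pyGetD a i 0) fives.length 0 (fives.length : Int)) 0

-- ===== PRECONDITION & SPEC =====
-- Pre_ excludes n > len(arr): there A's index arithmetic reads past the end of arr and
-- usually raises IndexError (when it happens not to, the value hinges on the same accidental
-- out-of-range pointer state), while B's natural count returns a value.
def Pre_dominantPairs (n : Int) (arr : List Int) : Prop := n ≤ (arr.length : Int)
instance (n : Int) (arr : List Int) : Decidable (Pre_dominantPairs n arr) := by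
  unfold Pre_dominantPairs; infer_instance

def pvWitness_dominantPairs : Int × List Int := (4, [30, 1, 2, 5])

def Spec_dominantPairs (n : Int) (arr : List Int) (out : Int) : Prop := out = dominantPairs_alt n arr
instance (n : Int) (arr : List Int) (out : Int) : Decidable (Spec_dominantPairs n arr out) := by unfold Spec_dominantPairs; infer_instance

-- ===== CLAIM (what is proved, stated in full; the proofs are below) =====
def Claim_equal_dominantPairs : Prop := ∀ (n : Int) (arr : List Int), Dom_dominantPairs n arr → Pre_dominantPairs n arr → Spec_dominantPairs n arr (dominantPairs n arr)

-- ===== LEMMAS AND PROOFS =====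

-- per-i contribution: how many y in arr[n//2:n] (of the mutated array) satisfy arr[i] >= 5*y
def pvCnt (a : List Int) (h2 n i : Int) : Int :=
  ((PySem.List.slice a (some h2) (some n)).countP
    (fun y => decide (PySem.List.pyGetD a i 0 ≥ 5 * y)) : Int)

-- a predicate true exactly on the first m positions counts m
lemma countP_eq_of_prefix {α : Type} (l : List α) (p : α → Bool) (m : Nat) (hm : m ≤ l.length)
    (h1 : ∀ k (hk : k < m), p (l[k]'(by omega)) = true)
    (h2 : ∀ k (hk : k < l.length), m ≤ k → p (l[k]) = false) :
    l.countP p = m := by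
  induction l generalizing m with
  | nil => simp at hm ⊢; omega
  | cons x t ih =>
    cases m with
    | zero =>
      rw [List.countP_eq_zero.mpr]
      intro y hy
      obtain ⟨k, hk, rfl⟩ := List.getElem_of_mem hy
      simp [h2 k hk (by omega)]
    | succ m' =>
      have hx : p x = true := h1 0 (by omega)
      have hlen : m' ≤ t.length := by simp at hm; omega
      have heq : t.countP p = m' := ih m' hlen
        (fun k hk => by simpa using h1 (k + 1) (by omega))
        (fun k hk hmk => by simpa using h2 (k + 1) (by simp; omega) (by omega))
      simp [hx, heq]

lemma loopA_eq (n : Int) (a : List Int) (h2 : Int) (hh : h2 = PySem.Int.floordiv n 2)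
    (hnL : n ≤ (a.length : Int))
    (hs1 : ∀ p q : Int, 0 ≤ p → p ≤ q → q < h2 →
      PySem.List.pyGetD a p 0 ≤ PySem.List.pyGetD a q 0)
    (hs2 : ∀ p q : Int, h2 ≤ p → p ≤ q → q < n →
      PySem.List.pyGetD a p 0 ≤ PySem.List.pyGetD a q 0) :
    ∀ (fuel : Nat) (i j ans : Int), (n - j).toNat + (h2 - i).toNat ≤ fuel →
      0 ≤ i → i ≤ h2 → h2 ≤ j → j ≤ n →
      (i < h2 → ∀ k, h2 ≤ k → k < j → 5 * PySem.List.pyGetD a k 0 ≤ PySem.List.pyGetD a i 0) →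
      pvLoopA n a fuel i j ans = ans + ((PySem.List.pyRange i h2 1).map (pvCnt a h2 n)).sum := by
  intro fuel
  induction fuel with
  | zero =>
    intro i j ans hm h0i hih2 hh2j hjn hcons
    have : i = h2 := by omega
    subst this
    rw [pvLoopA, PySem.List.pyRange_one_eq_nil (by omega)]
    simp
  | succ fuel ih =>
    intro i j ans hm h0i hih2 hh2j hjn hcons
    rw [pvLoopA]
    by_cases hi : i < PySem.Int.floordiv n 2
    · rw [if_pos hi]
      have hih2' : i < h2 := by omega
      by_cases hc : j < n ∧ PySem.List.pyGetD a i 0 ≥ 5 * PySem.List.pyGetD a j 0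
      · rw [if_pos hc]
        refine ih i (j + 1) ans (by omega) h0i hih2 (by omega) (by omega) ?_
        intro _ k hk1 hk2
        by_cases hkj : k < j
        · exact hcons hih2' k hk1 hkj
        · have : k = j := by omega
          subst this
          exact hc.2
      · rw [if_neg hc]
        have hkey : pvCnt a h2 n i = j - h2 := by
          have hP : ((h2.toNat : Nat) : Int) = h2 := Int.toNat_of_nonneg (by omega)
          have hN : ((n.toNat : Nat) : Int) = n := Int.toNat_of_nonneg (by omega)
          unfold pvCnt
          rw [← hP, ← hN, PySem.List.slice_natCast]
          have hlen : ((a.drop h2.toNat).take (n.toNat - h2.toNat)).length = n.toNat - h2.toNat := by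
            simp; omega
          rw [countP_eq_of_prefix _ _ (j - h2).toNat (by omega)]
          · omega
          · intro k hk
            have hkl : h2.toNat + k < a.length := by omega
            have hgd : PySem.List.pyGetD a (h2 + (k : Int)) 0 = a[h2.toNat + k] := by
              rw [PySem.List.pyGetD_eq_getElem a 0 (by omega) (by omega)]
              congr 1
              omega
            have hcond := hcons hih2' (h2 + (k : Int)) (by omega) (by omega)
            rw [hgd] at hcond
            simp only [List.getElem_take, List.getElem_drop]
            simpa using hcond
          · intro k hk hmk
            have hkl : h2.toNat + k < a.length := by omega
            have hjn' : j < n := by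
              by_contra hno
              omega
            have hnc : PySem.List.pyGetD a i 0 < 5 * PySem.List.pyGetD a j 0 := by
              by_contra hno
              exact hc ⟨hjn', by omega⟩
            have hmono := hs2 j (h2 + (k : Int)) hh2j (by omega) (by omega)
            have hgd : PySem.List.pyGetD a (h2 + (k : Int)) 0 = a[h2.toNat + k] := by
              rw [PySem.List.pyGetD_eq_getElem a 0 (by omega) (by omega)]
              congr 1
              omega
            rw [hgd] at hmono
            simp only [List.getElem_take, List.getElem_drop]
            simp only [decide_eq_false_iff_not, not_le, ge_iff_le]
            omega
        rw [ih (i + 1) j (ans + (j - PySem.Int.floordiv n 2)) (by omega) (by omega) (by omega)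
          hh2j hjn ?_]
        · rw [PySem.List.pyRange_one_cons (by omega : i < h2)]
          rw [List.map_cons, List.sum_cons, hkey]
          rw [hh]
          ring
        · intro h' k hk1 hk2
          have h5 := hcons hih2' k hk1 hk2
          have hmono := hs1 i (i + 1) (by omega) (by omega) (by omega)
          omega
    · rw [if_neg hi]
      have : i = h2 := by omega
      subst this
      rw [PySem.List.pyRange_one_eq_nil (by omega)]
      simp

lemma alt_eq_sum (n : Int) (arr : List Int) :
    dominantPairs_alt n arr =
      ((PySem.List.pyRange 0 (PySem.Int.floordiv n 2) 1).map
        (fun i => pvBisect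
          ((PySem.List.slice (pvMut n arr) (some (PySem.Int.floordiv n 2)) (some n)).map (fun y => 5 * y))
          (PySem.List.pyGetD (pvMut n arr) i 0)
          ((PySem.List.slice (pvMut n arr) (some (PySem.Int.floordiv n 2)) (some n)).map (fun y => 5 * y)).length 0
          (((PySem.List.slice (pvMut n arr) (some (PySem.Int.floordiv n 2)) (some n)).map (fun y => 5 * y)).length : Int))).sum := by
  unfold dominantPairs_alt
  simp only [PySem.List.foldl_add]
  simp

-- the binary search computes the count of elements ≤ x in a nondecreasing list
lemma bisect_eq_countP (l : List Int) (x : Int)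
    (hmono : ∀ (p q : Nat) (hq : q < l.length) (hpq : p ≤ q), l[p]'(by omega) ≤ l[q]) :
    ∀ (fuel : Nat) (lo hi : Int), (hi - lo).toNat ≤ fuel → 0 ≤ lo → lo ≤ hi → hi ≤ (l.length : Int) →
      (∀ (k : Nat), k < lo.toNat → (hk : k < l.length) → l[k] ≤ x) →
      (∀ (k : Nat), hi.toNat ≤ k → (hk : k < l.length) → x < l[k]) →
      pvBisect l x fuel lo hi = (l.countP (fun y => decide (y ≤ x)) : Int) := by
  intro fuel
  induction fuel with
  | zero =>
    intro lo hi hm h0 hlh hhl hlow hhigh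
    have heq : lo = hi := by omega
    have hcount : l.countP (fun y => decide (y ≤ x)) = lo.toNat := by
      refine countP_eq_of_prefix l _ lo.toNat (by omega) ?_ ?_
      · intro k hk
        simpa using hlow k hk (by omega)
      · intro k hk hmk
        simpa using hhigh k (by omega) hk
    rw [pvBisect, hcount]
    omega
  | succ fuel ih =>
    intro lo hi hm h0 hlh hhl hlow hhigh
    rw [pvBisect]
    by_cases hcmp : lo < hi
    · rw [if_pos hcmp]
      have hfd : PySem.Int.floordiv (lo + hi) 2 = (lo + hi) / 2 :=
        PySem.Int.floordiv_eq_ediv_of_pos (by norm_num)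
      have hmid0 : 0 ≤ PySem.Int.floordiv (lo + hi) 2 := by omega
      have hmidlt : PySem.Int.floordiv (lo + hi) 2 < hi := by omega
      have hmidge : lo ≤ PySem.Int.floordiv (lo + hi) 2 := by omega
      have hgd : PySem.List.pyGetD l (PySem.Int.floordiv (lo + hi) 2) 0
          = l[(PySem.Int.floordiv (lo + hi) 2).toNat]'(by omega) :=
        PySem.List.pyGetD_eq_getElem l 0 (by omega) (by omega)
      by_cases hcv : PySem.List.pyGetD l (PySem.Int.floordiv (lo + hi) 2) 0 ≤ x
      · rw [if_pos hcv]
        refine ih _ _ (by omega) (by omega) (by omega) (by omega) ?_ hhigh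
        intro k hk hklen
        have hle : l[k] ≤ l[(PySem.Int.floordiv (lo + hi) 2).toNat]'(by omega) :=
          hmono k _ (by omega) (by omega)
        rw [hgd] at hcv
        omega
      · rw [if_neg hcv]
        refine ih _ _ (by omega) h0 (by omega) (by omega) hlow ?_
        intro k hk hklen
        have hle : l[(PySem.Int.floordiv (lo + hi) 2).toNat]'(by omega) ≤ l[k] :=
          hmono _ k hklen (by omega)
        rw [hgd] at hcv
        omega
    · rw [if_neg hcmp]
      have heq : lo = hi := by omega
      have hcount : l.countP (fun y => decide (y ≤ x)) = lo.toNat := by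
        refine countP_eq_of_prefix l _ lo.toNat (by omega) ?_ ?_
        · intro k hk
          simpa using hlow k hk (by omega)
        · intro k hk hmk
          simpa using hhigh k (by omega) hk
      rw [hcount]
      omega

-- per-element: B's binary search over fives computes exactly the per-i count pvCnt
lemma bisect_cnt (A : List Int) (h2 n i : Int)
    (hnL : n ≤ (A.length : Int)) (h2nn : 0 ≤ h2) (h2n : h2 ≤ n)
    (hs2 : ∀ p q : Int, h2 ≤ p → p ≤ q → q < n →
      PySem.List.pyGetD A p 0 ≤ PySem.List.pyGetD A q 0) :
    pvBisect ((PySem.List.slice A (some h2) (some n)).map (fun y => 5 * y))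
      (PySem.List.pyGetD A i 0)
      ((PySem.List.slice A (some h2) (some n)).map (fun y => 5 * y)).length 0
      (((PySem.List.slice A (some h2) (some n)).map (fun y => 5 * y)).length : Int)
      = pvCnt A h2 n i := by
  have hslice : PySem.List.slice A (some h2) (some n)
      = (A.drop h2.toNat).take (n.toNat - h2.toNat) := by
    have hsl := PySem.List.slice_natCast (xs := A) (a := h2.toNat) (b := n.toNat)
    rw [Int.toNat_of_nonneg h2nn, Int.toNat_of_nonneg (by omega : (0:Int) ≤ n)] at hsl
    exact hsl
  rw [hslice]
  have hslen : ((A.drop h2.toNat).take (n.toNat - h2.toNat)).length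
      = n.toNat - h2.toNat := by
    simp
    omega
  have hgetS : ∀ (k : Nat) (hk : k < n.toNat - h2.toNat),
      ((A.drop h2.toNat).take (n.toNat - h2.toNat))[k]'(by omega)
        = PySem.List.pyGetD A (h2 + (k : Int)) 0 := by
    intro k hk
    rw [PySem.List.pyGetD_eq_getElem _ 0 (by omega) (by omega)]
    simp only [List.getElem_take, List.getElem_drop]
    congr 1
    omega
  have hmonoF : ∀ (p q : Nat)
      (hq : q < (((A.drop h2.toNat).take (n.toNat - h2.toNat)).map (fun y => 5 * y)).length)
      (hpq : p ≤ q),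
      (((A.drop h2.toNat).take (n.toNat - h2.toNat)).map (fun y => 5 * y))[p]'(by omega) ≤
      (((A.drop h2.toNat).take (n.toNat - h2.toNat)).map (fun y => 5 * y))[q] := by
    intro p q hq hpq
    rw [List.length_map, hslen] at hq
    simp only [List.getElem_map]
    rw [hgetS p (by omega), hgetS q (by omega)]
    have := hs2 (h2 + (p : Int)) (h2 + (q : Int)) (by omega) (by omega) (by omega)
    omega
  rw [bisect_eq_countP _ _ hmonoF _ 0 _ (by simp) (by omega) (by positivity) (by omega) ?_ ?_]
  · unfold pvCnt
    rw [hslice, List.countP_map]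
    norm_cast
  · intro k hk hklen
    omega
  · intro k hk hklen
    rw [List.length_map, hslen] at hklen
    simp only [List.length_map] at hk
    omega

-- ===== VERDICT (by name: the statement is the Claim_ definition above) =====
theorem dominantPairs_spec : Claim_equal_dominantPairs := by
  intro n arr _ hpre
  have hpre' : n ≤ (arr.length : Int) := hpre
  unfold Spec_dominantPairs
  rw [alt_eq_sum, dominantPairs]
  by_cases hpos : 0 < PySem.Int.floordiv n 2
  · have hfd : PySem.Int.floordiv n 2 = n / 2 := PySem.Int.floordiv_eq_ediv_of_pos (by norm_num)
    have h2nn : (0 : Int) ≤ PySem.Int.floordiv n 2 := by omega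
    have h2n : PySem.Int.floordiv n 2 ≤ n := by rw [hfd]; omega
    have hmut : pvMut n arr =
        PySem.List.sorted (arr.take (PySem.Int.floordiv n 2).toNat) (fun x => x) false ++
        PySem.List.sorted (arr.drop (PySem.Int.floordiv n 2).toNat) (fun x => x) false := by
      rw [pvMut, PySem.List.slice_to _ h2nn, PySem.List.slice_from _ h2nn]
    rw [hmut]
    have hlen1 : (PySem.List.sorted (arr.take (PySem.Int.floordiv n 2).toNat) (fun x => x) false).length
        = (PySem.Int.floordiv n 2).toNat := by
      rw [PySem.List.length_sorted]
      simp
      omega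
    have hlen2 : (PySem.List.sorted (arr.drop (PySem.Int.floordiv n 2).toNat) (fun x => x) false).length
        = arr.length - (PySem.Int.floordiv n 2).toNat := by
      rw [PySem.List.length_sorted]
      simp
    have hlen : ((PySem.List.sorted (arr.take (PySem.Int.floordiv n 2).toNat) (fun x => x) false ++
        PySem.List.sorted (arr.drop (PySem.Int.floordiv n 2).toNat) (fun x => x) false).length : Int)
        = (arr.length : Int) := by
      rw [List.length_append, hlen1, hlen2]
      push_cast
      omega
    have hs1 : ∀ p q : Int, 0 ≤ p → p ≤ q → q < PySem.Int.floordiv n 2 →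
        PySem.List.pyGetD (PySem.List.sorted (arr.take (PySem.Int.floordiv n 2).toNat) (fun x => x) false ++
          PySem.List.sorted (arr.drop (PySem.Int.floordiv n 2).toNat) (fun x => x) false) p 0 ≤
        PySem.List.pyGetD (PySem.List.sorted (arr.take (PySem.Int.floordiv n 2).toNat) (fun x => x) false ++
          PySem.List.sorted (arr.drop (PySem.Int.floordiv n 2).toNat) (fun x => x) false) q 0 := by
      intro p q hp hpq hq
      rw [PySem.List.pyGetD_eq_getElem _ 0 (by omega) (by omega),
          PySem.List.pyGetD_eq_getElem _ 0 (by omega) (by omega)]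
      rw [List.getElem_append_left (by omega), List.getElem_append_left (by omega)]
      exact PySem.List.sorted_id_getElem_mono _ (by omega) (by omega)
    have hs2 : ∀ p q : Int, PySem.Int.floordiv n 2 ≤ p → p ≤ q → q < n →
        PySem.List.pyGetD (PySem.List.sorted (arr.take (PySem.Int.floordiv n 2).toNat) (fun x => x) false ++
          PySem.List.sorted (arr.drop (PySem.Int.floordiv n 2).toNat) (fun x => x) false) p 0 ≤
        PySem.List.pyGetD (PySem.List.sorted (arr.take (PySem.Int.floordiv n 2).toNat) (fun x => x) false ++
          PySem.List.sorted (arr.drop (PySem.Int.floordiv n 2).toNat) (fun x => x) false) q 0 := by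
      intro p q hp hpq hq
      rw [PySem.List.pyGetD_eq_getElem _ 0 (by omega) (by omega),
          PySem.List.pyGetD_eq_getElem _ 0 (by omega) (by omega)]
      rw [List.getElem_append_right (by omega), List.getElem_append_right (by omega)]
      exact PySem.List.sorted_id_getElem_mono _ (by omega) (by omega)
    have hmain := loopA_eq n _ (PySem.Int.floordiv n 2) rfl (by omega) hs1 hs2
      ((n - PySem.Int.floordiv n 2).toNat + (PySem.Int.floordiv n 2).toNat)
      0 (PySem.Int.floordiv n 2) 0 (by omega) (by omega) (by omega) (by omega) (by omega)
      (by intro _ k hk1 hk2; omega)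
    rw [hmain, zero_add]
    refine congrArg List.sum (List.map_congr_left ?_)
    intro i hi_mem
    exact (bisect_cnt _ (PySem.Int.floordiv n 2) n i (by omega) h2nn h2n hs2).symm
  · rw [PySem.List.pyRange_one_eq_nil (by omega)]
    simp only [List.map_nil, List.sum_nil]
    cases hf : (n - PySem.Int.floordiv n 2).toNat + (PySem.Int.floordiv n 2).toNat with
    | zero => rw [pvLoopA]
    | succ k => rw [pvLoopA, if_neg hpos]
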